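-- pv_equiv track=rewrite | github.com/lxtqa/riscv | src/utils/ast_utils.py | gumtree_parser
-- ===== SOURCE A (Python) =====
-- def gumtree_parser(txtfile):
--     '''
--     对gumtree txtdiff生成的txt文件进行parse,获取match关系到一个list中, 获取diff关系到另一个list
--     返回这两个list
--     '''
--     content=txtfile.split("\n")
--     if content[-1] == "":
--         content = content[:-1]
--     line_rank = 0
--     matches = []
--     diffs = []
--     operation = []
--     while 1:
--         if line_rank >= len(content):
--             if operation!=[]:
--                 if operation[0] == 'match':
--                     matches.append(operation.copy())
--                 else:
--                     diffs.append(operation.copy())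
--                 operation = []
--             break
--         line = content[line_rank].replace("\n","")
--         if line == "===":
--             if operation!=[]:
--                 if operation[0] == 'match':
--                     matches.append(operation.copy())
--                 else:
--                     diffs.append(operation.copy())
--                 operation = []
--         else:
--             operation.append(line)
--         line_rank = line_rank+1
--     return matches,diffs
-- ===== SOURCE B (Python) =====
-- def gumtree_parser(txtfile):
--     lines = txtfile.split("\n")
--     if lines and lines[-1] == "":
--         lines = lines[:-1]
--     # staged passes: locate separator positions, slice the blocks between
--     # consecutive separators, then classify blocks with two filters
--     seps = [-1] + [i for i, l in enumerate(lines) if l == "==="] + [len(lines)]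
--     blocks = [lines[a + 1:b] for a, b in zip(seps, seps[1:]) if b - a > 1]
--     matches = [b for b in blocks if b[0] == "match"]
--     diffs = [b for b in blocks if b[0] != "match"]
--     return matches, diffs
-- ===== Notes on version B (the rewrite author's own statement) =====
-- stated objective: alternative
-- what changed: Replaces A's single-pass index/accumulator state machine by staged passes: collect separator positions with enumerate, slice the blocks between consecutive separators, then split blocks into matches/diffs with two filter comprehensions.
import Mathlib
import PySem

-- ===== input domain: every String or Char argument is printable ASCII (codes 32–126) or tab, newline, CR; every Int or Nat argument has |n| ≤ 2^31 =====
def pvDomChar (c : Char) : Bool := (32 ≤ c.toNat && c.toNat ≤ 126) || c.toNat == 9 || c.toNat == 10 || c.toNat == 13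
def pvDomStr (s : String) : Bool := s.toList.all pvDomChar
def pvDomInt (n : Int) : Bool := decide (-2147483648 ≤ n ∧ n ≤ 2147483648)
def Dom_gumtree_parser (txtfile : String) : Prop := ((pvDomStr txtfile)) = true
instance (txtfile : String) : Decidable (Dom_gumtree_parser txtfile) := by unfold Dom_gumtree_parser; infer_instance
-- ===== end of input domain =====

-- B replaces A's single-pass index/accumulator/end-of-input-flush state machine by staged
-- passes: collect the separator positions, slice the blocks between consecutive separators,
-- then classify the blocks with two filters (alternative decomposition; same O(n) cost).

-- ===== PORT A =====

-- A's repeated flush: 'if operation != []: if operation[0] == "match": matches.append(...) else diffs.append(...)'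
def pvFlushA (operation : List String) (ms ds : List (List String)) :
    List (List String) × List (List String) :=
  match operation with
  | [] => (ms, ds)
  | op0 :: _ => if op0 = "match" then (ms ++ [operation], ds) else (ms, ds ++ [operation])

-- A's 'while 1' loop over content with index line_rank, state (matches, diffs, operation)
def pvLoopA : List String → List (List String) → List (List String) → List String →
    List (List String) × List (List String)
  | [], ms, ds, operation => pvFlushA operation ms ds
  | l :: rest, ms, ds, operation =>
    let line := PySem.Str.replace l "\n" ""
    if line = "===" then
      let md := pvFlushA operation ms ds
      pvLoopA rest md.1 md.2 []
    else
      pvLoopA rest ms ds (operation ++ [line])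

def gumtree_parser (txtfile : String) : List (List String) × List (List String) :=
  let content := (PySem.Str.split? txtfile "\n").getD []   -- sep "\n" ≠ "": split? is always some
  let content := if PySem.List.pyGet? content (-1) = some "" then PySem.List.slice content none (some (-1)) else content
  pvLoopA content [] [] []

-- ===== PORT B =====

-- '[i for i, l in enumerate(lines) if l == "==="]'
def pvSepIdx (lines : List String) : List Int :=
  ((PySem.List.enumerate lines).filter (fun p => p.2 == "===")).map (fun p => p.1)

def gumtree_parser_alt (txtfile : String) : List (List String) × List (List String) :=
  let lines := (PySem.Str.split? txtfile "\n").getD []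
  let lines := if lines.getLast? = some "" then lines.dropLast else lines   -- 'if lines and lines[-1]==""'
  let seps : List Int := [-1] ++ pvSepIdx lines ++ [(lines.length : Int)]
  let blocks := ((seps.zip seps.tail).filter (fun p : Int × Int => decide (p.2 - p.1 > 1))).map
      (fun p => PySem.List.slice lines (some (p.1 + 1)) (some p.2))
  (blocks.filter (fun b => PySem.List.pyGet? b 0 == some "match"),
   blocks.filter (fun b => PySem.List.pyGet? b 0 != some "match"))

-- ===== PRECONDITION & SPEC =====
def Spec_gumtree_parser (txtfile : String) (out : List (List String) × List (List String)) : Prop := out = gumtree_parser_alt txtfile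
instance (txtfile : String) (out : List (List String) × List (List String)) : Decidable (Spec_gumtree_parser txtfile out) := by unfold Spec_gumtree_parser; infer_instance

-- ===== CLAIM (what is proved, stated in full; the proofs are below) =====
def Claim_equal_gumtree_parser : Prop := ∀ (txtfile : String), Dom_gumtree_parser txtfile → Spec_gumtree_parser txtfile (gumtree_parser txtfile)

-- ===== LEMMAS AND PROOFS =====

-- the canonical block decomposition both ports compute: maximal non-"===" runs
def pvBlocks : List String → List (List String)
  | [] => []
  | l :: rest =>
    if l = "===" then pvBlocks rest
    else (l :: rest.takeWhile (fun x => !(x == "==="))) ::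
      pvBlocks (rest.dropWhile (fun x => !(x == "===")))
termination_by ls => ls.length
decreasing_by
  · simp
  · simpa using Nat.lt_succ_of_le (List.length_dropWhile_le _ rest)

def pvStep2 (acc : List (List String) × List (List String)) (b : List String) :
    List (List String) × List (List String) :=
  if b.headI = "match" then (acc.1 ++ [b], acc.2) else (acc.1, acc.2 ++ [b])

theorem pvBlocks_cons (l : String) (rest : List String) :
    pvBlocks (l :: rest) = if l = "===" then pvBlocks rest
      else (l :: rest.takeWhile (fun x => !(x == "==="))) ::
        pvBlocks (rest.dropWhile (fun x => !(x == "==="))) := by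
  rw [pvBlocks]

-- A's loop equals the fold over non-separator blocks (given that replace is the identity on the lines)
theorem pvLoopA_foldl (n : Nat) : ∀ ls : List String, ls.length ≤ n →
    (∀ x ∈ ls, PySem.Str.replace x "\n" "" = x) →
    (∀ m d, pvLoopA ls m d [] = (pvBlocks ls).foldl pvStep2 (m, d)) ∧
    (∀ m d op, op ≠ [] →
      pvLoopA ls m d op =
        (pvBlocks (ls.dropWhile (fun x => !(x == "===")))).foldl pvStep2
          (pvStep2 (m, d) (op ++ ls.takeWhile (fun x => !(x == "==="))))) := by
  induction n with
  | zero =>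
    intro ls hls _
    rw [List.eq_nil_of_length_eq_zero (Nat.le_zero.mp hls)]
    refine ⟨fun m d => by simp [pvLoopA, pvFlushA, pvBlocks], fun m d op hop => ?_⟩
    match op, hop with
    | op0 :: opr, _ =>
      simp only [List.dropWhile_nil, List.takeWhile_nil, List.append_nil]
      rw [pvBlocks]
      simp [pvLoopA, pvFlushA, pvStep2]
  | succ n ih =>
    intro ls hls hrep
    match ls with
    | [] =>
      refine ⟨fun m d => by simp [pvLoopA, pvFlushA, pvBlocks], fun m d op hop => ?_⟩
      match op, hop with
      | op0 :: opr, _ =>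
        simp only [List.dropWhile_nil, List.takeWhile_nil, List.append_nil]
        rw [pvBlocks]
        simp [pvLoopA, pvFlushA, pvStep2]
    | l :: rest =>
      have hlen : rest.length ≤ n := by simp at hls; omega
      have hrep' : ∀ x ∈ rest, PySem.Str.replace x "\n" "" = x := fun x hx => hrep x (List.mem_cons_of_mem _ hx)
      have hrl : PySem.Str.replace l "\n" "" = l := hrep l List.mem_cons_self
      have ihr := ih rest hlen hrep'
      by_cases hl : l = "==="
      · constructor
        · intro m d
          rw [pvLoopA]
          simp only [hrl, if_pos hl]
          simp only [pvFlushA]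
          rw [(ihr.1) m d]
          conv_rhs => rw [pvBlocks]
          rw [if_pos hl]
        · intro m d op hop
          rw [pvLoopA]
          simp only [hrl, if_pos hl]
          have hflush : pvFlushA op m d = pvStep2 (m, d) op := by
            match op, hop with
            | op0 :: opr, _ => simp [pvFlushA, pvStep2]
          rw [List.takeWhile_cons_of_neg (by simp [hl]), List.dropWhile_cons_of_neg (by simp [hl])]
          simp only [List.append_nil]
          show pvLoopA rest (pvFlushA op m d).1 (pvFlushA op m d).2 [] = _
          rw [hflush, (ihr.1) (pvStep2 (m, d) op).1 (pvStep2 (m, d) op).2]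
          conv_rhs => rw [pvBlocks]
          rw [if_pos hl]
      · constructor
        · intro m d
          rw [pvLoopA]
          simp only [hrl, if_neg hl]
          show pvLoopA rest m d ([] ++ [l]) = _
          rw [List.nil_append, (ihr.2) m d [l] (by simp)]
          conv_rhs => rw [pvBlocks]
          rw [if_neg hl, List.foldl_cons]
          rfl
        · intro m d op hop
          rw [pvLoopA]
          simp only [hrl, if_neg hl]
          show pvLoopA rest m d (op ++ [l]) = _
          rw [(ihr.2) m d (op ++ [l]) (by simp)]
          rw [List.takeWhile_cons_of_pos (by simp [hl]), List.dropWhile_cons_of_pos (by simp [hl])]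
          simp

-- splitting on "\n" produces pieces free of '\n'
theorem pvSplitGo_no_nl (fuel : Nat) : ∀ l cur : List Char, ∀ acc : List (List Char),
    l.length < fuel → '\n' ∉ cur → (∀ p ∈ acc, '\n' ∉ p) →
    ∀ p ∈ PySem.Chars.splitOn.go ['\n'] fuel l cur acc, '\n' ∉ p := by
  induction fuel with
  | zero => intro l cur acc h; omega
  | succ f ih =>
    intro l cur acc hlen hcur hacc
    match l with
    | [] =>
      rw [PySem.Chars.splitOn.go]
      case x_5 => omega
      intro p hp
      simp only [List.mem_reverse, List.mem_cons] at hp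
      rcases hp with h | h
      · subst h; simpa using hcur
      · exact hacc p h
    | c :: t =>
      rw [PySem.Chars.splitOn.go]
      by_cases hc : c = '\n'
      · rw [if_pos (by simp [hc, List.isPrefixOf])]
        exact ih _ [] _ (by simp at hlen ⊢; omega) (by simp)
          (by intro p hp
              simp only [List.mem_cons] at hp
              rcases hp with h | h
              · subst h; simpa using hcur
              · exact hacc p h)
      · rw [if_neg (by simp [List.isPrefixOf]; exact fun h => hc h.symm)]
        exact ih _ _ _ (by simp at hlen ⊢; omega) (by simp [hcur]; exact fun h => hc h.symm) hacc

-- replace s "\n" "" is the identity on '\n'-free strings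
theorem pvReplaceGo_id (fuel : Nat) : ∀ l acc : List Char, '\n' ∉ l → l.length ≤ fuel →
    PySem.Chars.replace.go ['\n'] [] fuel l acc = acc.reverse ++ l := by
  induction fuel with
  | zero =>
    intro l acc _ hlen
    rw [PySem.Chars.replace.go]
  | succ f ih =>
    intro l acc hl hlen
    match l with
    | [] =>
      rw [PySem.Chars.replace.go]
      case x_4 => omega
      simp
    | c :: t =>
      rw [PySem.Chars.replace.go]
      have hc : c ≠ '\n' := by simp at hl; exact fun h => hl.1 h.symm
      rw [if_neg (by simp [List.isPrefixOf]; exact fun h => hc h.symm)]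
      rw [ih t (c :: acc) (by simp at hl; exact hl.2) (by simp at hlen; omega)]
      simp

theorem pvReplace_id (s : String) (h : '\n' ∉ s.toList) : PySem.Str.replace s "\n" "" = s := by
  have : PySem.Chars.replace s.toList ['\n'] [] = s.toList := by
    rw [PySem.Chars.replace]
    rw [if_neg (by simp)]
    rw [pvReplaceGo_id s.toList.length s.toList [] h le_rfl]
    simp
  calc PySem.Str.replace s "\n" "" = String.ofList (PySem.Chars.replace s.toList "\n".toList "".toList) := rfl
    _ = s := by rw [show ("\n".toList : List Char) = ['\n'] from rfl, show ("".toList : List Char) = [] from rfl, this, String.ofList_toList]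

theorem pvContent_no_nl (s : String) :
    ∀ x ∈ (PySem.Str.split? s "\n").getD [], '\n' ∉ x.toList := by
  have hsplit : PySem.Str.split? s "\n" = some ((PySem.Chars.splitOn s.toList ['\n']).map String.ofList) := by
    simp [PySem.Str.split?, PySem.Chars.split?]
  rw [hsplit]
  intro x hx
  simp only [Option.getD_some, List.mem_map] at hx
  obtain ⟨p, hp, rfl⟩ := hx
  rw [String.toList_ofList]
  have : ∀ q ∈ PySem.Chars.splitOn s.toList ['\n'], '\n' ∉ q := by
    rw [PySem.Chars.splitOn]
    exact pvSplitGo_no_nl _ _ _ _ (by omega) (by simp) (by simp)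
  exact this p hp

-- the two trimmings agree on every list
theorem pvTrim_eq (content : List String) :
    (if PySem.List.pyGet? content (-1) = some "" then PySem.List.slice content none (some (-1)) else content) =
    (if content.getLast? = some "" then content.dropLast else content) := by
  rw [PySem.List.pyGet?_neg_one, PySem.List.slice_to_neg_one]

-- ===== B-side lemmas =====

-- the block extractor B applies to the separator pairs
def pvProc (ls : List String) (ps : List (Int × Int)) : List (List String) :=
  (ps.filter (fun p => decide (p.2 - p.1 > 1))).map
    (fun p => PySem.List.slice ls (some (p.1 + 1)) (some p.2))

-- the fenced separator positions [..seps.., len]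
def pvT (ls : List String) : List Int := pvSepIdx ls ++ [(ls.length : Int)]

theorem pvSepFrom_shift : ∀ (xs : List String) (s t : Int),
    ((PySem.List.enumerate xs s).filter (fun p => p.2 == "===")).map (fun p => p.1)
      = (((PySem.List.enumerate xs t).filter (fun p => p.2 == "===")).map (fun p => p.1)).map (· + (s - t)) := by
  intro xs
  induction xs with
  | nil => intro s t; simp [PySem.List.enumerate_nil]
  | cons x xs ih =>
    intro s t
    rw [PySem.List.enumerate_cons, PySem.List.enumerate_cons, List.filter_cons, List.filter_cons]
    have h1 : s + 1 - (t + 1) = s - t := by ring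
    by_cases hx : (x == "===") = true
    · rw [if_pos hx, if_pos hx, List.map_cons, List.map_cons, ih (s + 1) (t + 1), h1, List.map_cons]
      have hhd : (t, x).1 + (s - t) = (s, x).1 := by simp
      rw [hhd]
    · rw [if_neg hx, if_neg hx, ih (s + 1) (t + 1), h1]

theorem pvSepFrom_shift0 (xs : List String) (s : Int) :
    ((PySem.List.enumerate xs s).filter (fun p => p.2 == "===")).map (fun p => p.1)
      = (pvSepIdx xs).map (· + s) := by
  have h := pvSepFrom_shift xs s 0
  simpa [pvSepIdx] using h

theorem pvSepIdx_cons_sep (xs : List String) :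
    pvSepIdx ("===" :: xs) = (0 : Int) :: (pvSepIdx xs).map (· + 1) := by
  show ((PySem.List.enumerate ("===" :: xs) 0).filter (fun p => p.2 == "===")).map (fun p => p.1) = _
  rw [PySem.List.enumerate_cons, List.filter_cons, if_pos (by decide), List.map_cons,
    show ((0 : Int) + 1) = 1 from rfl, pvSepFrom_shift0 xs 1]

theorem pvSepIdx_nonneg (xs : List String) : ∀ i ∈ pvSepIdx xs, 0 ≤ i := by
  intro i hi
  simp only [pvSepIdx, List.mem_map, List.mem_filter] at hi
  obtain ⟨p, ⟨hp, _⟩, rfl⟩ := hi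
  rw [PySem.List.mem_enumerate_iff] at hp
  obtain ⟨k, hk, rfl⟩ := hp
  simp

theorem pvT_nonneg (xs : List String) : ∀ i ∈ pvT xs, 0 ≤ i := by
  intro i hi
  rcases List.mem_append.mp hi with h | h
  · exact pvSepIdx_nonneg xs i h
  · simp at h; omega

-- slicing past a prefix of known length lands in the suffix
theorem pvSlice_shift (pre suf : List String) (i j : Int) (hi : 0 ≤ i) (hj : 0 ≤ j) :
    PySem.List.slice (pre ++ suf) (some (i + (pre.length : Int))) (some (j + (pre.length : Int)))
      = PySem.List.slice suf (some i) (some j) := by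
  rw [PySem.List.slice_toNat _ (by omega) (by omega), PySem.List.slice_toNat _ hi hj]
  have h1 : (i + (pre.length : Int)).toNat = i.toNat + pre.length := by omega
  have h2 : (j + (pre.length : Int)).toNat = j.toNat + pre.length := by omega
  rw [h1, h2, List.drop_append]
  have h3 : i.toNat + pre.length - pre.length = i.toNat := by omega
  have h4 : List.drop (i.toNat + pre.length) pre = [] := List.drop_eq_nil_of_le (by omega)
  rw [h3, h4, List.nil_append]
  congr 1
  omega

-- shifting all separator pairs by the prefix length moves pvProc from the suffix to the whole
theorem pvProc_shift (pre suf : List String) (c : Int) (hc : c = (pre.length : Int))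
    (ps : List (Int × Int)) (h1 : ∀ p ∈ ps, -1 ≤ p.1) (h2 : ∀ p ∈ ps, 0 ≤ p.2) :
    pvProc (pre ++ suf) (ps.map (fun p => (p.1 + c, p.2 + c))) = pvProc suf ps := by
  unfold pvProc
  rw [List.filter_map]
  have hfil : (ps.filter ((fun p : Int × Int => decide (p.2 - p.1 > 1)) ∘ (fun p => (p.1 + c, p.2 + c))))
      = ps.filter (fun p => decide (p.2 - p.1 > 1)) := by
    refine List.filter_congr fun p _ => ?_
    simp only [Function.comp]
    by_cases h : p.2 - p.1 > 1
    · rw [decide_eq_true (by omega : p.2 + c - (p.1 + c) > 1), decide_eq_true h]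
    · rw [decide_eq_false (by omega : ¬ p.2 + c - (p.1 + c) > 1), decide_eq_false h]
  rw [hfil, List.map_map]
  refine List.map_congr_left fun p hp => ?_
  have hp' := List.mem_filter.mp hp
  have hb1 := h1 p hp'.1
  have hb2 := h2 p hp'.1
  simp only [Function.comp]
  have : p.1 + c + 1 = (p.1 + 1) + (pre.length : Int) := by omega
  rw [this, hc, pvSlice_shift pre suf (p.1 + 1) p.2 (by omega) hb2]

-- the fenced positions of a list that is empty or starts with "===" begin with 0
theorem pvT_dropWhile_head (xs : List String) :
    (pvT (xs.dropWhile (fun x => !(x == "===")))).head? = some 0 := by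
  cases h : xs.dropWhile (fun x => !(x == "===")) with
  | nil => rfl
  | cons r0 rs =>
    have hr0 : r0 = "===" := by
      have hh := List.head?_dropWhile_not (p := fun x => !(x == "===")) xs
      rw [h] at hh
      simpa using hh
    subst hr0
    unfold pvT
    rw [pvSepIdx_cons_sep]
    rfl

-- B's staged slicing computes exactly the maximal non-"===" runs
theorem pvProc_eq_blocks (n : Nat) : ∀ ls : List String, ls.length ≤ n →
    pvProc ls (((-1 : Int) :: pvT ls).zip (pvT ls)) = pvBlocks ls := by
  induction n with
  | zero =>
    intro ls hls
    rw [List.eq_nil_of_length_eq_zero (Nat.le_zero.mp hls)]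
    rw [show pvBlocks [] = [] from by simp [pvBlocks]]
    decide
  | succ n ih =>
    intro ls hls
    match ls with
    | [] =>
      rw [show pvBlocks [] = [] from by simp [pvBlocks]]
      decide
    | l :: rest =>
      by_cases hl : l = "==="
      · -- separator head: first pair (-1,0) is filtered out, the rest shifts by 1
        subst hl
        have hT : pvT ("===" :: rest) = (0 : Int) :: (pvT rest).map (· + 1) := by
          unfold pvT
          rw [pvSepIdx_cons_sep]
          simp
        rw [hT]
        have hzip : (((-1 : Int) :: (0 : Int) :: (pvT rest).map (· + 1)).zip ((0 : Int) :: (pvT rest).map (· + 1)))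
            = ((-1 : Int), (0 : Int)) :: ((((-1 : Int) :: pvT rest).zip (pvT rest)).map
                (fun p => (p.1 + 1, p.2 + 1))) := by
          have h0 : (0 : Int) :: (pvT rest).map (· + 1) = ((-1 : Int) :: pvT rest).map (· + 1) := by
            simp
          rw [List.zip_cons_cons, h0, List.zip_map]
          rfl
        rw [hzip]
        show pvProc ("===" :: rest) _ = _
        unfold pvProc
        rw [List.filter_cons]
        rw [if_neg (by simp)]
        show pvProc ("===" :: rest) ((((-1 : Int) :: pvT rest).zip (pvT rest)).map (fun p => (p.1 + 1, p.2 + 1))) = _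
        have hshift := pvProc_shift ["==="] rest 1 (by simp)
          (((-1 : Int) :: pvT rest).zip (pvT rest))
          (fun p hp => by
            rcases List.of_mem_zip (show (p.1, p.2) ∈ _ from hp) with ⟨h1, _⟩
            rcases List.mem_cons.mp h1 with h | h
            · omega
            · have := pvT_nonneg rest p.1 h; omega)
          (fun p hp => by
            rcases List.of_mem_zip (show (p.1, p.2) ∈ _ from hp) with ⟨_, h2⟩
            exact pvT_nonneg rest p.2 h2)
        have hshift' : pvProc ("===" :: rest) ((((-1 : Int) :: pvT rest).zip (pvT rest)).map (fun p => (p.1 + 1, p.2 + 1)))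
            = pvProc rest (((-1 : Int) :: pvT rest).zip (pvT rest)) := hshift
        rw [hshift']
        rw [ih rest (by simp at hls; omega), pvBlocks_cons]
        rw [if_pos rfl]
      · -- non-separator head: the first block is the maximal run, the rest shifts by its length
        set B := (l :: rest.takeWhile (fun x => !(x == "==="))) with hB
        set rest' := rest.dropWhile (fun x => !(x == "===")) with hrest'
        have hsplit : B ++ rest' = l :: rest := by
          rw [hB, hrest', List.cons_append]
          congr 1
          exact List.takeWhile_append_dropWhile
        have hBlen : 1 ≤ B.length := by rw [hB]; simp
        have hBnosep : ∀ x ∈ B, (x == "===") = false := by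
          intro x hx
          rw [hB] at hx
          rcases List.mem_cons.mp hx with h | h
          · subst h; simp [hl]
          · have := List.mem_takeWhile_imp h; simpa using this
        -- separator positions of ls are those of rest' shifted by |B|
        have hsep : pvSepIdx (l :: rest) = (pvSepIdx rest').map (· + (B.length : Int)) := by
          rw [← hsplit]
          show ((PySem.List.enumerate (B ++ rest') 0).filter (fun p => p.2 == "===")).map (fun p => p.1) = _
          rw [PySem.List.enumerate_append, List.filter_append]
          have hB0 : (PySem.List.enumerate B 0).filter (fun p => p.2 == "===") = [] := by
            rw [List.filter_eq_nil_iff]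
            intro p hp
            rw [PySem.List.mem_enumerate_iff] at hp
            obtain ⟨k, hk, rfl⟩ := hp
            simp [hBnosep _ (List.getElem_mem hk)]
          rw [hB0, List.nil_append]
          rw [show ((0 : Int) + (B.length : Nat)) = ((B.length : Nat) : Int) from by ring]
          exact pvSepFrom_shift0 rest' (B.length : Int)
        have hT : pvT (l :: rest) = (pvT rest').map (· + (B.length : Int)) := by
          unfold pvT
          rw [hsep, List.map_append]
          congr 1
          simp only [List.map_cons, List.map_nil]
          congr 1
          rw [← hsplit]
          simp
          ring
        rw [hT]
        have hrlen : rest'.length ≤ n := by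
          have h1 : rest'.length ≤ rest.length := by rw [hrest']; exact List.length_dropWhile_le _ rest
          simp at hls; omega
        rw [← hsplit]
        -- peel the first pair (-1, head of shifted pvT)
        match hTr : pvT rest' with
        | [] => exact absurd hTr (by unfold pvT; simp)
        | t0 :: ts =>
          have ht00 : t0 = 0 := by
            have hh := pvT_dropWhile_head rest
            rw [← hrest', hTr] at hh
            simpa using hh
          subst ht00
          rw [List.map_cons, List.zip_cons_cons]
          unfold pvProc
          rw [List.filter_cons]
          rw [if_pos (by simp only []; rw [decide_eq_true_eq]; omega)]
          rw [List.map_cons]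
          -- the head block is B itself
          have hhead : PySem.List.slice (B ++ rest') (some ((-1 : Int) + 1)) (some ((0 : Int) + (B.length : Int))) = B := by
            rw [show ((-1 : Int) + 1) = ((0 : Nat) : Int) from rfl]
            rw [show ((0 : Int) + (B.length : Int)) = ((B.length : Nat) : Int) from by ring]
            rw [PySem.List.slice_natCast]
            simp
          rw [hhead]
          -- the remaining pairs: zip of the shifted tail = shift of zip (0::ts) ts
          have hzip2 : (((0 : Int) + (B.length : Int)) :: ts.map (· + (B.length : Int))).zip (ts.map (· + (B.length : Int)))
              = ((((0 : Int) :: ts).zip ts).map (fun p => (p.1 + (B.length : Int), p.2 + (B.length : Int)))) := by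
            rw [show (((0 : Int) + (B.length : Int)) :: ts.map (· + (B.length : Int))) = ((0 : Int) :: ts).map (· + (B.length : Int)) from rfl]
            rw [List.zip_map]
            rfl
          rw [hzip2]
          have hbound1 : ∀ p ∈ ((0 : Int) :: ts).zip ts, -1 ≤ p.1 := fun p hp => by
            rcases List.of_mem_zip (show (p.1, p.2) ∈ _ from hp) with ⟨h1, _⟩
            have hmem : p.1 ∈ pvT rest' := by rw [hTr]; exact h1
            have := pvT_nonneg rest' p.1 hmem; omega
          have hbound2 : ∀ p ∈ ((0 : Int) :: ts).zip ts, 0 ≤ p.2 := fun p hp => by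
            rcases List.of_mem_zip (show (p.1, p.2) ∈ _ from hp) with ⟨_, h2⟩
            have hmem : p.2 ∈ pvT rest' := by rw [hTr]; exact List.mem_cons_of_mem _ h2
            exact pvT_nonneg rest' p.2 hmem
          have hshift := pvProc_shift B rest' (B.length : Int) rfl (((0 : Int) :: ts).zip ts) hbound1 hbound2
          unfold pvProc at hshift
          rw [hshift]
          -- dropping the filtered (-1, 0) pair relates this to the full zip on rest'
          have hfull : pvProc rest' (((-1 : Int) :: pvT rest').zip (pvT rest'))
              = pvProc rest' (((0 : Int) :: ts).zip ts) := by
            rw [hTr, List.zip_cons_cons]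
            unfold pvProc
            rw [List.filter_cons]
            rw [if_neg (by simp)]
          unfold pvProc at hfull
          rw [← hfull]
          have hih := ih rest' hrlen
          unfold pvProc at hih
          rw [hih, hsplit, pvBlocks_cons, if_neg hl, ← hB, ← hrest']

-- every block is nonempty
theorem pvBlocks_ne_nil (n : Nat) : ∀ ls : List String, ls.length ≤ n →
    ∀ b ∈ pvBlocks ls, b ≠ [] := by
  induction n with
  | zero =>
    intro ls hls
    rw [List.eq_nil_of_length_eq_zero (Nat.le_zero.mp hls)]
    simp [pvBlocks]
  | succ n ih =>
    intro ls hls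
    match ls with
    | [] => simp [pvBlocks]
    | l :: rest =>
      rw [pvBlocks]
      by_cases hl : l = "==="
      · rw [if_pos hl]
        exact ih rest (by simp at hls; omega)
      · rw [if_neg hl]
        intro b hb
        rcases List.mem_cons.mp hb with h | h
        · subst h; simp
        · refine ih _ ?_ b h
          have := List.length_dropWhile_le (fun x => !(x == "===")) rest
          simp at hls; omega

-- folding A's classifier equals two filters
theorem pvFoldl_filter (bs : List (List String)) : ∀ ms ds,
    bs.foldl pvStep2 (ms, ds) =
      (ms ++ bs.filter (fun b => b.headI == "match"), ds ++ bs.filter (fun b => !(b.headI == "match"))) := by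
  induction bs with
  | nil => intro ms ds; simp
  | cons b bs ih =>
    intro ms ds
    rw [List.foldl_cons, List.filter_cons, List.filter_cons]
    by_cases h : b.headI = "match"
    · have hb : (b.headI == "match") = true := by simp [h]
      rw [hb]
      simp only [Bool.not_true, if_pos, if_neg (by simp : ¬ (false = true))]
      show List.foldl pvStep2 (pvStep2 (ms, ds) b) bs = _
      rw [show pvStep2 (ms, ds) b = (ms ++ [b], ds) from by simp [pvStep2, h]]
      rw [ih]
      simp
    · have hb : (b.headI == "match") = false := by simp [h]
      rw [hb]
      simp only [Bool.not_false, if_neg (by simp : ¬ (false = true)), if_pos]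
      show List.foldl pvStep2 (pvStep2 (ms, ds) b) bs = _
      rw [show pvStep2 (ms, ds) b = (ms, ds ++ [b]) from by simp [pvStep2, h]]
      rw [ih]
      simp

-- ===== VERDICT (by name: the statement is the Claim_ definition above) =====
theorem gumtree_parser_spec : Claim_equal_gumtree_parser := by
  intro txtfile _
  show gumtree_parser txtfile = gumtree_parser_alt txtfile
  show pvLoopA (if PySem.List.pyGet? ((PySem.Str.split? txtfile "\n").getD []) (-1) = some "" then
      PySem.List.slice ((PySem.Str.split? txtfile "\n").getD []) none (some (-1)) else
      ((PySem.Str.split? txtfile "\n").getD [])) [] [] [] = gumtree_parser_alt txtfile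
  rw [pvTrim_eq]
  set lines0 := (PySem.Str.split? txtfile "\n").getD [] with hlines0
  set lines := if lines0.getLast? = some "" then lines0.dropLast else lines0 with hlines
  have hsub : ∀ x ∈ lines, x ∈ lines0 := by
    intro x hx
    rw [hlines] at hx
    split at hx
    · exact List.dropLast_subset _ hx
    · exact hx
  have hrep : ∀ x ∈ lines, PySem.Str.replace x "\n" "" = x := fun x hx =>
    pvReplace_id x (pvContent_no_nl txtfile x (hsub x hx))
  rw [(pvLoopA_foldl lines.length lines le_rfl hrep).1 [] []]
  rw [pvFoldl_filter, List.nil_append, List.nil_append]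
  show _ = (((((([-1] ++ pvSepIdx lines ++ [(lines.length : Int)]).zip
      (([-1] ++ pvSepIdx lines ++ [(lines.length : Int)]).tail)).filter (fun p : Int × Int => decide (p.2 - p.1 > 1))).map
      (fun p : Int × Int => PySem.List.slice lines (some (p.1 + 1)) (some p.2))).filter (fun b => PySem.List.pyGet? b 0 == some "match")),
      ((((([-1] ++ pvSepIdx lines ++ [(lines.length : Int)]).zip
      (([-1] ++ pvSepIdx lines ++ [(lines.length : Int)]).tail)).filter (fun p : Int × Int => decide (p.2 - p.1 > 1))).map
      (fun p : Int × Int => PySem.List.slice lines (some (p.1 + 1)) (some p.2))).filter (fun b => PySem.List.pyGet? b 0 != some "match")))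
  have hexpr : ((([-1] ++ pvSepIdx lines ++ [(lines.length : Int)]).zip
      (([-1] ++ pvSepIdx lines ++ [(lines.length : Int)]).tail)).filter (fun p : Int × Int => decide (p.2 - p.1 > 1))).map
      (fun p : Int × Int => PySem.List.slice lines (some (p.1 + 1)) (some p.2)) = pvBlocks lines := by
    have : ([-1] ++ pvSepIdx lines ++ [(lines.length : Int)]) = ((-1 : Int) :: pvT lines) := by
      unfold pvT; simp
    rw [this]
    rw [show ((-1 : Int) :: pvT lines).tail = pvT lines from rfl]
    exact pvProc_eq_blocks lines.length lines le_rfl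
  rw [hexpr]
  have hne := pvBlocks_ne_nil lines.length lines le_rfl
  congr 1
  · refine List.filter_congr fun b hb => ?_
    match b, hne b hb with
    | h :: t, _ =>
      rw [PySem.List.pyGet?_zero_cons]
      simp [List.headI]
  · refine List.filter_congr fun b hb => ?_
    match b, hne b hb with
    | h :: t, _ =>
      rw [PySem.List.pyGet?_zero_cons]
      simp [List.headI, bne]
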